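-- pv_equiv track=rewrite | github.com/twobackfromtheend/quRL | quantum_evolution/simulations/protocol_tester.py | get_h_list
-- ===== SOURCE A (Python) =====
-- from typing import Sequence, Callable
--
-- def get_h_list(protocol: Sequence[int]) -> Sequence[int]:
--     h_list = []
--     current_h_x = 4
--
--     for i in range(len(protocol)):
--         if protocol[i] == 1:
--             current_h_x *= -1
--         h_list.append(current_h_x)
--
--     return h_list
-- ===== SOURCE B (Python) =====
-- def get_h_list(protocol):
--     # run-length construction: find flip positions, then emit constant runs between them
--     n = len(protocol)
--     flips = [i for i, x in enumerate(protocol) if x == 1]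
--     out = []
--     sign = 4
--     prev = 0
--     for f in flips:
--         out.extend([sign] * (f - prev))
--         sign = -sign
--         prev = f
--     out.extend([sign] * (n - prev))
--     return out
-- ===== Notes on version B (the rewrite author's own statement) =====
-- stated objective: alternative
-- what changed: Replaces the element-by-element sign-toggling loop with a run-length construction: first collect the indices of 1s, then emit constant-sign runs (list replication) between consecutive flip positions.
import Mathlib
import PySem

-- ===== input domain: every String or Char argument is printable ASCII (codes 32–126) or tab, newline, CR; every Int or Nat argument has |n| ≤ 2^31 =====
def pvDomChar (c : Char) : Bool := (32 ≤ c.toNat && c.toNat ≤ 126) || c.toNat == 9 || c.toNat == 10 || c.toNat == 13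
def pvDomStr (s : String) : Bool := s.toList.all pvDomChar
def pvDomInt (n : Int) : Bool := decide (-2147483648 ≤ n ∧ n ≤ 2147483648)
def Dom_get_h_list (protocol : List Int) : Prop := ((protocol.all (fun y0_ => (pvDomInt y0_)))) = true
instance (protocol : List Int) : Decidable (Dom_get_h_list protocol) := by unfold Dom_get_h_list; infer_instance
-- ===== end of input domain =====

-- B replaces A's element-by-element sign toggle by a run-length construction over the flip positions (alternative decomposition, same cost).

-- ===== PORT A =====
-- loop body: flip the running sign on a 1, append it
def pvStepA (s : List Int × Int) (x : Int) : List Int × Int :=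
  let cur := if x == 1 then -s.2 else s.2
  (s.1 ++ [cur], cur)

def get_h_list (protocol : List Int) : List Int :=
  (protocol.foldl pvStepA ([], 4)).1

-- ===== PORT B =====
-- loop body: emit the constant run [sign] * (f - prev), flip sign, advance prev
def pvStepB (s : List Int × Int × Int) (f : Int) : List Int × Int × Int :=
  (s.1 ++ List.replicate (f - s.2.2).toNat s.2.1, -s.2.1, f)

-- pass 1: flips = [i for i, x in enumerate(protocol) if x == 1];
-- pass 2: constant runs between consecutive flips, then the final pad to n
def get_h_list_alt (protocol : List Int) : List Int :=
  let n : Int := protocol.length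
  let flips := (PySem.List.enumerate protocol).filterMap
      (fun p => if p.2 == 1 then some p.1 else none)
  let r := flips.foldl pvStepB ([], 4, 0)
  r.1 ++ List.replicate (n - r.2.2).toNat r.2.1

-- ===== PRECONDITION & SPEC =====
def Spec_get_h_list (protocol : List Int) (out : List Int) : Prop := out = get_h_list_alt protocol
instance (protocol : List Int) (out : List Int) : Decidable (Spec_get_h_list protocol out) := by unfold Spec_get_h_list; infer_instance

-- ===== CLAIM =====
def Claim_equal_get_h_list : Prop := ∀ (protocol : List Int), Dom_get_h_list protocol → Spec_get_h_list protocol (get_h_list protocol)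

-- ===== LEMMAS AND PROOFS =====

-- A as a cons-building recursion
def aRec : List Int → Int → List Int
  | [], _ => []
  | x :: t, s => let cur := if x == 1 then -s else s; cur :: aRec t cur

theorem pvFoldA_acc (l : List Int) (acc : List Int) (cur : Int) :
    (l.foldl pvStepA (acc, cur)).1 = acc ++ (l.foldl pvStepA ([], cur)).1 := by
  induction l generalizing acc cur with
  | nil => simp
  | cons x t ih =>
    simp only [List.foldl_cons, pvStepA]
    rw [ih, ih]
    simp
    conv_rhs => rw [ih]
    simp

theorem pvA_eq_aRec (l : List Int) (s : Int) :
    (l.foldl pvStepA ([], s)).1 = aRec l s := by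
  induction l generalizing s with
  | nil => rfl
  | cons x t ih =>
    simp only [List.foldl_cons, pvStepA, aRec]
    rw [pvFoldA_acc]
    by_cases hx : x = 1
    · simp [hx, ih]
    · simp [hx, ih]

-- flip positions with starting index k (recursive characterization of the filterMap over enumerate)
def flipsFrom : List Int → Int → List Int
  | [], _ => []
  | x :: t, k => (if x == 1 then [k] else []) ++ flipsFrom t (k + 1)

theorem pvFlips_eq (l : List Int) (k : Int) :
    (PySem.List.enumerate l k).filterMap (fun p => if p.2 == 1 then some p.1 else none)
      = flipsFrom l k := by
  induction l generalizing k with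
  | nil => simp [PySem.List.enumerate_nil, flipsFrom]
  | cons x t ih =>
    rw [PySem.List.enumerate_cons]
    have ih' : List.filterMap (fun p => if p.2 == 1 then some p.1 else none)
        (PySem.List.enumerate t (k + 1)) = flipsFrom t (k + 1) := ih (k + 1)
    by_cases hx : x = 1 <;> simp [flipsFrom, hx] <;> simpa using ih'

theorem pvFlips_ge (l : List Int) (k : Int) : ∀ f ∈ flipsFrom l k, k ≤ f := by
  induction l generalizing k with
  | nil => simp [flipsFrom]
  | cons x t ih =>
    intro f hf
    simp only [flipsFrom, List.mem_append] at hf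
    rcases hf with hf | hf
    · by_cases hx : x = 1 <;> simp [hx] at hf
      omega
    · have := ih (k + 1) f hf; omega

-- recursive form of B's run-emitting loop (state without the accumulated list)
def segRun : List Int → Int → Int → Int → List Int
  | [], s, prev, n => List.replicate (n - prev).toNat s
  | f :: rest, s, prev, n => List.replicate (f - prev).toNat s ++ segRun rest (-s) f n

theorem pvFoldB_eq_segRun (fs : List Int) (acc : List Int) (s prev n : Int) :
    (fs.foldl pvStepB (acc, s, prev)).1
      ++ List.replicate (n - (fs.foldl pvStepB (acc, s, prev)).2.2).toNat
           (fs.foldl pvStepB (acc, s, prev)).2.1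
      = acc ++ segRun fs s prev n := by
  induction fs generalizing acc s prev with
  | nil => simp [segRun]
  | cons f rest ih =>
    simp only [List.foldl_cons, pvStepB, segRun]
    rw [ih]
    simp

-- shifting prev up by one prepends one sign element, if every flip and n lie beyond prev
theorem pvSegRun_shift (fs : List Int) (s prev n : Int)
    (hfs : ∀ f ∈ fs, prev + 1 ≤ f) (hn : prev + 1 ≤ n) :
    segRun fs s prev n = s :: segRun fs s (prev + 1) n := by
  cases fs with
  | nil =>
    simp only [segRun]
    have h1 : (n - prev).toNat = (n - (prev + 1)).toNat + 1 := by omega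
    rw [h1, List.replicate_succ]
  | cons f rest =>
    simp only [segRun]
    have hf : prev + 1 ≤ f := hfs f (List.mem_cons_self ..)
    have h1 : (f - prev).toNat = (f - (prev + 1)).toNat + 1 := by omega
    rw [h1, List.replicate_succ]
    rfl

theorem pvMain (l : List Int) (s k : Int) :
    segRun (flipsFrom l k) s k (l.length + k) = aRec l s := by
  induction l generalizing s k with
  | nil => simp [flipsFrom, segRun, aRec]
  | cons x t ih =>
    have hge := pvFlips_ge t (k + 1)
    have hn : k + 1 ≤ ((x :: t).length : Int) + k := by simp only [List.length_cons]; push_cast; omega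
    have harg : ((x :: t).length : Int) + k = (t.length : Int) + (k + 1) := by simp only [List.length_cons]; push_cast; omega
    rw [harg] at hn ⊢
    by_cases hx : x = 1
    · subst hx
      simp only [flipsFrom, beq_self_eq_true, if_true, List.singleton_append, segRun, aRec]
      have h0 : ((k : Int) - k).toNat = 0 := by omega
      rw [h0, List.replicate_zero, List.nil_append,
        pvSegRun_shift _ (-s) k _ hge hn, ih (-s) (k + 1)]
    · have hb : (x == 1) = false := by simp [hx]
      simp only [flipsFrom, hb, Bool.false_eq_true, if_false, List.nil_append, aRec]
      rw [pvSegRun_shift _ s k _ hge hn, ih s (k + 1)]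

-- ===== VERDICT =====
theorem get_h_list_spec : Claim_equal_get_h_list := by
  intro protocol _
  show get_h_list protocol = get_h_list_alt protocol
  unfold get_h_list get_h_list_alt
  rw [pvA_eq_aRec, pvFlips_eq,
    pvFoldB_eq_segRun (flipsFrom protocol 0) [] 4 0 protocol.length]
  simpa using (pvMain protocol 4 0).symm
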